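-- pv_equiv track=rewrite | github.com/Surya290898/sCrawler | crawler/security_audit.py | _parse_csp
-- ===== SOURCE A (Python) =====
-- from typing import List, Dict, Tuple
--
-- def _parse_csp(raw: str) -> Tuple[Dict[str, str], bool]:
--     """
--     Parse CSP into {directive_name -> value_string}
--     Return (dict, has_duplicate_names)
--     """
--     d: Dict[str, str] = {}
--     seen: Dict[str, int] = {}
--     for part in [p.strip() for p in raw.split(";") if p.strip()]:
--         if " " in part:
--             name, rest = part.split(" ", 1)
--             name_l = name.lower()
--             seen[name_l] = seen.get(name_l, 0) + 1
--             # Keep first; we'll still report duplicates via 'seen'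
--             if name_l not in d:
--                 d[name_l] = rest.strip()
--         else:
--             name_l = part.lower()
--             seen[name_l] = seen.get(name_l, 0) + 1
--             if name_l not in d:
--                 d[name_l] = ""
--     dup = any(cnt > 1 for cnt in seen.values())
--     return d, dup
-- ===== SOURCE B (Python) =====
-- def _parse_csp(raw):
--     """Staged pipeline: (1) extract the (name, value) pairs list, then derive
--     (2) the dict -- first-occurrence values via a reversed last-write-wins dict,
--     first-appearance key order via dict.fromkeys -- and (3) the duplicate flag
--     by comparing distinct-name count with total pair count."""
--     pairs = []
--     for p in raw.split(";"):
--         part = p.strip()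
--         if not part:
--             continue
--         if " " in part:
--             name, rest = part.split(" ", 1)
--             pairs.append((name.lower(), rest.strip()))
--         else:
--             pairs.append((part.lower(), ""))
--     first_vals = dict(reversed(pairs))          # last write wins == first occurrence's value
--     d = {n: first_vals[n] for n in dict.fromkeys(n for n, _ in pairs)}
--     return d, len(first_vals) != len(pairs)
-- ===== Notes on version B (the rewrite author's own statement) =====
-- stated objective: alternative
-- what changed: B restructures A's single interleaved loop into a staged pipeline: extract a flat (name, value) pairs list, build the result dict from it with a reversed last-write-wins dict plus dict.fromkeys key ordering (no membership-test insert loop), and derive the duplicate flag by comparing the distinct-name count with the total pair count instead of A's per-name counter table scanned by any().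
import Mathlib
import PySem

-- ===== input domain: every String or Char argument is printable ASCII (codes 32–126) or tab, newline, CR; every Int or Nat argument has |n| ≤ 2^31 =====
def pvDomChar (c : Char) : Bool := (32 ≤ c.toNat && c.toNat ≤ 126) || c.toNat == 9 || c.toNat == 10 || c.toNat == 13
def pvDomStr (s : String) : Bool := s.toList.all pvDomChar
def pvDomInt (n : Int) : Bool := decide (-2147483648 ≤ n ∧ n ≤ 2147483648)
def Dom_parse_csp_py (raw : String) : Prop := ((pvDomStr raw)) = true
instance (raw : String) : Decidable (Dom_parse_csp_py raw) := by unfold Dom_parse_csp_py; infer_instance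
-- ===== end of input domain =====

-- B restructures A's interleaved loop into a staged pipeline (pairs list, reversed last-write-wins dict + ordered dedup of names, distinct-vs-total length test for the duplicate flag); alternative decomposition, same cost.


-- ===== PORT A =====
-- A's loop body: updates (d, seen) for one already-stripped nonempty part
def pvAStep (st : PySem.Dict String String × PySem.Dict String Int) (part : String) :
    PySem.Dict String String × PySem.Dict String Int :=
  if PySem.Str.isIn " " part then
    let pieces := (PySem.Str.splitMax? part " " 1).getD []
    let name := pieces.getD 0 ""
    let rest := pieces.getD 1 ""
    let name_l := PySem.Str.lower name
    let seen := st.2.insert name_l (st.2.getD name_l 0 + 1)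
    if st.1.contains name_l then (st.1, seen)
    else (st.1.insert name_l (PySem.Str.strip rest), seen)
  else
    let name_l := PySem.Str.lower part
    let seen := st.2.insert name_l (st.2.getD name_l 0 + 1)
    if st.1.contains name_l then (st.1, seen)
    else (st.1.insert name_l "", seen)

def parse_csp_py (raw : String) : (List (String × String)) × Bool :=
  let parts := (((PySem.Str.split? raw ";").getD []).map PySem.Str.strip).filter (fun p => p ≠ "")
  let st := parts.foldl pvAStep (PySem.Dict.empty, PySem.Dict.empty)
  (st.1.items, st.2.values.any (fun c => decide (1 < c)))

-- ===== PORT B =====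
-- B's first stage: append the (lowered name, stripped value) pair of one raw split piece
def pvBPairStep (acc : List (String × String)) (p : String) : List (String × String) :=
  let part := PySem.Str.strip p
  if part = "" then acc
  else if PySem.Str.isIn " " part then
    let pieces := (PySem.Str.splitMax? part " " 1).getD []
    acc ++ [(PySem.Str.lower (pieces.getD 0 ""), PySem.Str.strip (pieces.getD 1 ""))]
  else acc ++ [(PySem.Str.lower part, "")]

def parse_csp_py_alt (raw : String) : (List (String × String)) × Bool :=
  let pairs := ((PySem.Str.split? raw ";").getD []).foldl pvBPairStep []
  -- dict(reversed(pairs)): last write wins, so each key ends with its FIRST value of pairs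
  let first_vals := pairs.reverse.foldl
      (fun d (q : String × String) => d.insert q.1 q.2) PySem.Dict.empty
  -- {n: first_vals[n] for n in dict.fromkeys(names)}; the lookup is total (every name occurs
  -- in pairs), ported as getD with "" default
  let d := (PySem.List.dedup (pairs.map Prod.fst)).foldl
      (fun d n => d.insert n (first_vals.getD n "")) PySem.Dict.empty
  (d.items, decide (first_vals.size ≠ pairs.length))

-- ===== PRECONDITION & SPEC =====
def Spec_parse_csp_py (raw : String) (out : (List (String × String)) × Bool) : Prop := out = parse_csp_py_alt raw
instance (raw : String) (out : (List (String × String)) × Bool) : Decidable (Spec_parse_csp_py raw out) := by unfold Spec_parse_csp_py; infer_instance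

-- ===== CLAIM (what is proved, stated in full; the proofs are below) =====
def Claim_equal_parse_csp_py : Prop := ∀ (raw : String), Dom_parse_csp_py raw → Spec_parse_csp_py raw (parse_csp_py raw)

-- ===== LEMMAS AND PROOFS =====

-- name/value extracted from one stripped nonempty part (proof-side normal form)
def pvName (part : String) : String :=
  if PySem.Str.isIn " " part then
    PySem.Str.lower (((PySem.Str.splitMax? part " " 1).getD []).getD 0 "")
  else PySem.Str.lower part

def pvVal (part : String) : String :=
  if PySem.Str.isIn " " part then
    PySem.Str.strip (((PySem.Str.splitMax? part " " 1).getD []).getD 1 "")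
  else ""

def pvPF (part : String) : String × String := (pvName part, pvVal part)

-- the two components of A's loop body, shaped over a pair
def pvDStep (d : PySem.Dict String String) (q : String × String) : PySem.Dict String String :=
  if d.contains q.1 then d else d.insert q.1 q.2

def pvSStep (s : PySem.Dict String Int) (q : String × String) : PySem.Dict String Int :=
  s.insert q.1 (s.getD q.1 0 + 1)

-- first value of name n in a pairs list ("" if absent)
def pvFv (ps : List (String × String)) (n : String) : String :=
  ((ps.find? (fun q => q.1 == n)).map Prod.snd).getD ""

theorem pvAStep_eq (st : PySem.Dict String String × PySem.Dict String Int) (part : String) :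
    pvAStep st part = (pvDStep st.1 (pvPF part), pvSStep st.2 (pvPF part)) := by
  unfold pvAStep pvDStep pvSStep pvPF pvName pvVal
  split_ifs <;> simp_all

theorem pvBPairs_eq (l : List String) (acc : List (String × String)) :
    l.foldl pvBPairStep acc = acc ++ ((l.map PySem.Str.strip).filter (fun p => p ≠ "")).map pvPF := by
  induction l generalizing acc with
  | nil => simp
  | cons p t ih =>
    simp only [List.foldl_cons, List.map_cons, List.filter_cons]
    by_cases hp : PySem.Str.strip p = ""
    · have : pvBPairStep acc p = acc := by unfold pvBPairStep; simp [hp]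
      rw [this]; simp [hp, ih]
    · have hstep : pvBPairStep acc p = acc ++ [pvPF (PySem.Str.strip p)] := by
        unfold pvBPairStep pvPF pvName pvVal
        simp only [hp, if_false]
        split_ifs <;> simp_all
      rw [hstep, ih]; simp [hp]

-- keys accumulated by the skip-or-insert fold
theorem pvDStep_keys (ps : List (String × String)) (d : PySem.Dict String String) :
    (ps.foldl pvDStep d).keys = PySem.Set.update d.keys (ps.map Prod.fst) := by
  induction ps generalizing d with
  | nil => rfl
  | cons q t ih =>
    simp only [List.foldl_cons, List.map_cons]
    rw [ih]
    have hk : (pvDStep d q).keys = PySem.Set.add d.keys q.1 := by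
      unfold pvDStep PySem.Set.add
      by_cases hc : d.contains q.1 = true
      · have hm : q.1 ∈ d.keys := (PySem.Dict.contains_iff_mem_keys _ _).mp hc
        simp [hc, hm, PySem.Set.contains]
      · have hm : q.1 ∉ d.keys := fun h => hc ((PySem.Dict.contains_iff_mem_keys _ _).mpr h)
        simp only [Bool.not_eq_true] at hc
        simp [hc, hm, PySem.Set.contains, PySem.Dict.keys_insert_of_not_contains d q.2 hc]
    rw [hk]
    rfl

theorem pvDStep_nodup (ps : List (String × String)) (d : PySem.Dict String String)
    (h : d.keys.Nodup) : (ps.foldl pvDStep d).keys.Nodup := by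
  induction ps generalizing d with
  | nil => exact h
  | cons q t ih =>
    simp only [List.foldl_cons]
    apply ih
    unfold pvDStep
    by_cases hc : d.contains q.1 = true
    · simpa [hc] using h
    · simp only [Bool.not_eq_true] at hc
      simpa [hc] using PySem.Dict.nodup_keys_insert d q.1 q.2 h

theorem pvDStep_getD (ps : List (String × String)) (d : PySem.Dict String String) (n : String) :
    (ps.foldl pvDStep d).getD n "" = if d.contains n then d.getD n "" else pvFv ps n := by
  induction ps generalizing d with
  | nil =>
    by_cases hc : d.contains n = true
    · simp [hc]
    · simp only [Bool.not_eq_true] at hc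
      simp [hc, pvFv, List.find?, PySem.Dict.getD_of_not_contains d "" hc]
  | cons q t ih =>
    simp only [List.foldl_cons]
    rw [ih]
    unfold pvDStep
    by_cases hn : n = q.1
    · by_cases hc : d.contains q.1 = true
      · have hcn : d.contains n = true := hn ▸ hc
        simp [hc, hn]
      · simp only [Bool.not_eq_true] at hc
        have hcn : d.contains n = false := hn ▸ hc
        have h1 : (d.insert q.1 q.2).contains n = true := by
          rw [hn]; exact PySem.Dict.contains_insert_self d q.1 q.2
        have h2 : (d.insert q.1 q.2).getD n "" = q.2 := by
          rw [hn]; exact PySem.Dict.getD_insert_self d q.1 q.2 ""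
        simp [hc, pvFv, List.find?, hn]
    · have hq : (q.1 == n) = false := by simp [Ne.symm hn]
      by_cases hc : d.contains q.1 = true
      · simp [hc, pvFv, List.find?, hq]
      · simp only [Bool.not_eq_true] at hc
        have h1 : (d.insert q.1 q.2).contains n = d.contains n := by
          rw [PySem.Dict.contains_insert]; simp [hn]
        have h2 : (d.insert q.1 q.2).getD n "" = d.getD n "" :=
          PySem.Dict.getD_insert_of_ne d q.2 "" hn
        simp [hc, h1, h2, pvFv, List.find?, hq]

-- the reversed last-write-wins dict looks up the FIRST value
theorem pvRev_getD (ps : List (String × String)) (d : PySem.Dict String String) (n : String) :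
    (ps.reverse.foldl (fun d (q : String × String) => d.insert q.1 q.2) d).getD n "" =
      if ps.any (fun q => q.1 == n) then pvFv ps n else d.getD n "" := by
  induction ps generalizing d with
  | nil => simp
  | cons q t ih =>
    rw [List.reverse_cons, List.foldl_append]
    simp only [List.foldl_cons, List.foldl_nil, List.any_cons]
    by_cases hn : n = q.1
    · have hq : (q.1 == n) = true := by simp [hn]
      rw [PySem.Dict.getD_insert]
      simp [hn, pvFv, List.find?]
    · have hq : (q.1 == n) = false := by simp [Ne.symm hn]
      rw [PySem.Dict.getD_insert_of_ne _ q.2 "" hn, ih]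
      simp only [hq, Bool.false_or]
      unfold pvFv
      rw [List.find?_cons_of_neg (p := fun q => (q : String × String).1 == n) (by simp [hq])]

theorem pvRev_getD_empty (ps : List (String × String)) (n : String) :
    (ps.reverse.foldl (fun d (q : String × String) => d.insert q.1 q.2) PySem.Dict.empty).getD n "" =
      pvFv ps n := by
  rw [pvRev_getD]
  cases hA : ps.any (fun q => q.1 == n) with
  | true => simp
  | false =>
    have hf : ps.find? (fun q => q.1 == n) = none := by
      apply List.find?_eq_none.mpr
      intro q hq
      have h1 := List.any_eq_false.mp hA q hq
      simp only [Bool.not_eq_true] at h1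
      simp [h1]
    simp [pvFv, hf]

theorem pvDedup_length_reverse (l : List String) :
    (PySem.List.dedup l.reverse).length = (PySem.List.dedup l).length := by
  exact List.Perm.length_eq <|
    (List.perm_ext_iff_of_nodup (PySem.List.nodup_dedup _) (PySem.List.nodup_dedup _)).mpr
      fun a => by simp

theorem pvSum_dedup_count (l : List String) :
    ((PySem.List.dedup l).map (fun k => l.count k)).sum = l.length := by
  have hperm : (PySem.List.dedup l).Perm l.dedup :=
    (List.perm_ext_iff_of_nodup (PySem.List.nodup_dedup l) l.nodup_dedup).mpr
      fun a => by simp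
  rw [(hperm.map (fun k => l.count k)).sum_eq]
  exact List.sum_map_count_dedup_eq_length l

theorem pvAny_one_lt (l : List Nat) (h : ∀ x ∈ l, 1 ≤ x) :
    (l.any (fun x => decide (1 < x))) = decide (l.length ≠ l.sum) := by
  induction l with
  | nil => simp
  | cons a t ih =>
    have hts : t.length ≤ t.sum :=
      List.length_le_sum_of_one_le t fun x hx => h x (List.mem_cons_of_mem a hx)
    have ha : 1 ≤ a := h a List.mem_cons_self
    simp only [List.any_cons, List.length_cons, List.sum_cons,
      ih fun x hx => h x (List.mem_cons_of_mem a hx)]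
    by_cases h1 : 1 < a
    · have h2 : t.length + 1 ≠ a + t.sum := by omega
      simp [h1, h2]
    · have ha1 : a = 1 := by omega
      subst ha1
      simp only [lt_irrefl, decide_false, Bool.false_or, decide_eq_decide]
      omega

-- duplicate flag: counter-scan equals the distinct-vs-total length test
theorem pvDup_eq (names : List String) :
    ((PySem.Dict.counter names (κ := String)).values.any (fun c => decide (1 < c))) =
      decide ((PySem.List.dedup names).length ≠ names.length) := by
  have hvals : (PySem.Dict.counter names (κ := String)).values =
      (PySem.List.dedup names).map (fun k => ((names.count k : Nat) : Int)) := by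
    simp only [PySem.Dict.values, PySem.Dict.items_counter, List.map_map,
      PySem.List.dedup_eq_ofList]
    rfl
  rw [hvals, List.any_map]
  have hcast : ∀ k : String,
      (decide (1 < ((names.count k : Nat) : Int))) = decide (1 < names.count k) := by
    intro k
    simp
  calc ((PySem.List.dedup names).any
          (fun k => decide (1 < ((names.count k : Nat) : Int))))
      = ((PySem.List.dedup names).map (fun k => names.count k)).any
          (fun x => decide (1 < x)) := by
        rw [List.any_map]
        exact congrArg _ (funext hcast)
    _ = decide ((PySem.List.dedup names).length ≠ names.length) := by
        rw [pvAny_one_lt _ (by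
          intro x hx
          obtain ⟨k, hk, rfl⟩ := List.mem_map.mp hx
          exact List.count_pos_iff.mpr ((PySem.List.mem_dedup names k).mp hk))]
        rw [List.length_map, pvSum_dedup_count]

-- ===== VERDICT (by name: the statement is the Claim_ definition above) =====
theorem parse_csp_py_spec : Claim_equal_parse_csp_py := by
  intro raw _
  unfold Spec_parse_csp_py parse_csp_py parse_csp_py_alt
  rw [pvBPairs_eq]
  dsimp only
  simp only [List.nil_append]
  set L := (PySem.Str.split? raw ";").getD [] with hL
  set parts := (L.map PySem.Str.strip).filter (fun p => p ≠ "") with hparts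
  set ps := parts.map pvPF with hps
  set names := ps.map Prod.fst with hnames
  set fv := ps.reverse.foldl (fun d (q : String × String) => d.insert q.1 q.2) PySem.Dict.empty
    with hfv
  -- A's fold splits into its two independent components over the pairs
  have hA : parts.foldl pvAStep (PySem.Dict.empty, PySem.Dict.empty)
      = (ps.foldl pvDStep PySem.Dict.empty, ps.foldl pvSStep PySem.Dict.empty) := by
    rw [PySem.List.foldl_congr_mem parts pvAStep
        (fun st part => (pvDStep st.1 (pvPF part), pvSStep st.2 (pvPF part))) _
        (fun acc x _ => pvAStep_eq acc x)]
    rw [PySem.List.foldl_prod_mk (f := fun d part => pvDStep d (pvPF part))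
        (g := fun s part => pvSStep s (pvPF part))]
    rw [hps, List.foldl_map, List.foldl_map]
  rw [hA]
  have hnd : (ps.foldl pvDStep PySem.Dict.empty).keys.Nodup :=
    pvDStep_nodup ps _ PySem.Dict.nodup_keys_empty
  have hkeys : (ps.foldl pvDStep PySem.Dict.empty).keys = PySem.List.dedup names := by
    rw [pvDStep_keys, PySem.Dict.keys_empty, PySem.List.dedup_eq_ofList, hnames]
    rfl
  have hAitems : (ps.foldl pvDStep PySem.Dict.empty).items
      = (PySem.List.dedup names).map (fun n => (n, pvFv ps n)) := by
    rw [PySem.Dict.items_eq_map_keys _ hnd "", hkeys]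
    refine List.map_congr_left (fun n _ => ?_)
    rw [pvDStep_getD]
    simp
  have hBitems : ((PySem.List.dedup names).foldl
        (fun d n => d.insert n (fv.getD n "")) PySem.Dict.empty).items
      = (PySem.List.dedup names).map (fun n => (n, fv.getD n "")) := by
    rw [PySem.Dict.items_foldl_insert_fresh _ (fun n => n) (fun n => fv.getD n "") _
        (fun a _ => PySem.Dict.contains_empty a)
        (by simp)]
    simp [PySem.Dict.empty]
  have hseen : ps.foldl pvSStep PySem.Dict.empty = PySem.Dict.counter names := by
    rw [← PySem.Dict.foldl_insert_getD_add_one_eq_counter, hnames, hps, List.map_map,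
      List.foldl_map, List.foldl_map]
    exact PySem.List.foldl_congr_mem _ _ _ _ (fun acc x _ => rfl)
  have hsz : ∀ (d : PySem.Dict String String), d.size = d.keys.length := fun d => by
    simp [PySem.Dict.size, PySem.Dict.keys]
  have hks : fv.keys = PySem.List.dedup names.reverse := by
    rw [hfv, PySem.Dict.keys_foldl_insert_key ps.reverse Prod.fst (fun _ q => q.2),
      PySem.Dict.keys_empty, List.map_reverse, ← hnames, PySem.List.dedup_eq_ofList]
    rfl
  have hsize : fv.size = (PySem.List.dedup names).length := by
    rw [hsz, hks, pvDedup_length_reverse]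
  simp only [Prod.mk.injEq]
  constructor
  · rw [hAitems, hBitems]
    exact List.map_congr_left (fun n _ => by rw [pvRev_getD_empty])
  · rw [hseen, pvDup_eq]
    simp only [← hfv, hsize, hnames, List.length_map]
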